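-- pv_equiv track=rewrite | github.com/eqmvii/claudiablot | read_loot.py | merge_close
-- ===== SOURCE A (Python) =====
-- def merge_close(segs: list, max_gap: int) -> list:
--     if not segs:
--         return segs
--     out = [segs[0][:]]
--     for s in segs[1:]:
--         if s[0] - out[-1][1] - 1 <= max_gap:
--             out[-1][1] = s[1]
--         else:
--             out.append(s[:])
--     return out
-- ===== SOURCE B (Python) =====
-- def merge_close(segs: list, max_gap: int) -> list:
--     if not segs:
--         return segs
--     # phase 1: partition segs into runs of consecutive segments whose gaps
--     # (computed from the ORIGINAL neighbouring segments) are within max_gap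
--     runs = [[segs[0]]]
--     for prev, s in zip(segs, segs[1:]):
--         if s[0] - prev[1] - 1 <= max_gap:
--             runs[-1].append(s)
--         else:
--             runs.append([s])
--     # phase 2: reduce each run to a copy of its first segment with the end
--     # overwritten by the run's last segment's end
--     out = []
--     for run in runs:
--         merged = run[0][:]
--         merged[1] = run[-1][1]
--         out.append(merged)
--     return out
-- ===== Notes on version B (the rewrite author's own statement) =====
-- stated objective: alternative
-- what changed: Replaces A's single pass that mutates the running merged interval's end with an explicit partition-then-reduce: first group consecutive segments into runs by comparing original neighbours (valid because A's running end always equals the previous segment's end), then emit each run's first segment copied with its end overwritten by the run's last segment's end.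
-- outside the precondition, e.g. on merge_close([[5]], 0): A returns [[5]], B raises IndexError; on merge_close([[1, 2], [9]], 0): A returns [[1, 2], [9]], B raises IndexError
import Mathlib
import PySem

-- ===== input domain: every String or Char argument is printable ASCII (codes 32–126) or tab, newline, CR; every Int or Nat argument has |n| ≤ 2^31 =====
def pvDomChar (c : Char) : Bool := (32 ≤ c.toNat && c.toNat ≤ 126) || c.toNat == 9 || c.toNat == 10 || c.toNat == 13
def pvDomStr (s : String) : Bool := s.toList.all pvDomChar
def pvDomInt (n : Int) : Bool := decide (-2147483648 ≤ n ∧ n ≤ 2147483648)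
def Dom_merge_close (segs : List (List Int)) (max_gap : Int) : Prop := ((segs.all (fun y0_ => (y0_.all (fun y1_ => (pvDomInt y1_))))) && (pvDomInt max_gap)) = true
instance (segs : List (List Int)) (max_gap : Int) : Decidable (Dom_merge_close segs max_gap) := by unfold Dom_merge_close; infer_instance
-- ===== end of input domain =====

-- B replaces A's running-end mutation with an explicit partition-into-runs phase followed by a
-- per-run reduce (copy first segment, overwrite its end with the run's last end); alternative, same cost.


-- ===== PORT A =====
-- loop body of A: 'if s[0] - out[-1][1] - 1 <= max_gap: out[-1][1] = s[1] else: out.append(s[:])'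
-- (pyGetD/pySetD are exact on Pre_, where every index is in range)
def mcStepA (max_gap : Int) (out : List (List Int)) (s : List Int) : List (List Int) :=
  if PySem.List.pyGetD s 0 0 - PySem.List.pyGetD (PySem.List.pyGetD out (-1) []) 1 0 - 1 ≤ max_gap then
    PySem.List.pySetD out (-1)
      (PySem.List.pySetD (PySem.List.pyGetD out (-1) []) 1 (PySem.List.pyGetD s 1 0))
  else
    out ++ [s]

def merge_close (segs : List (List Int)) (max_gap : Int) : List (List Int) :=
  match segs with
  | [] => []
  | s0 :: rest => rest.foldl (mcStepA max_gap) [s0]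

-- ===== PORT B =====
-- phase-1 loop body: 'if s[0] - prev[1] - 1 <= max_gap: runs[-1].append(s) else: runs.append([s])'
def mcStepB (max_gap : Int) (runs : List (List (List Int))) (p : List Int × List Int) : List (List (List Int)) :=
  if PySem.List.pyGetD p.2 0 0 - PySem.List.pyGetD p.1 1 0 - 1 ≤ max_gap then
    PySem.List.pySetD runs (-1) (PySem.List.pyGetD runs (-1) [] ++ [p.2])
  else
    runs ++ [[p.2]]

-- phase-2 body: 'merged = run[0][:]; merged[1] = run[-1][1]'
def mcEmit (run : List (List Int)) : List Int :=
  PySem.List.pySetD (PySem.List.pyGetD run 0 []) 1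
    (PySem.List.pyGetD (PySem.List.pyGetD run (-1) []) 1 0)

def merge_close_alt (segs : List (List Int)) (max_gap : Int) : List (List Int) :=
  match segs with
  | [] => []
  | s0 :: rest =>
    let runs := ((s0 :: rest).zip rest).foldl (mcStepB max_gap) [[s0]]
    runs.foldl (fun out run => out ++ [mcEmit run]) []

-- ===== PRECONDITION & SPEC =====
-- Pre_ excludes inputs containing a segment of fewer than two ints: there A raises IndexError except
-- in a few benign positions (it still returns), while B's run-reduction, which always writes index 1,
-- raises IndexError on all of them.
def Pre_merge_close (segs : List (List Int)) (max_gap : Int) : Prop :=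
  ∀ s ∈ segs, 2 ≤ s.length
instance (segs : List (List Int)) (max_gap : Int) : Decidable (Pre_merge_close segs max_gap) := by
  unfold Pre_merge_close; infer_instance
def pvWitness_merge_close : List (List Int) × Int := ([[1, 2], [5, 7], [9, 12]], 1)

def Spec_merge_close (segs : List (List Int)) (max_gap : Int) (out : List (List Int)) : Prop := out = merge_close_alt segs max_gap
instance (segs : List (List Int)) (max_gap : Int) (out : List (List Int)) : Decidable (Spec_merge_close segs max_gap out) := by unfold Spec_merge_close; infer_instance

-- ===== CLAIM (what is proved, stated in full; the proofs are below) =====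
def Claim_equal_merge_close : Prop := ∀ (segs : List (List Int)) (max_gap : Int), Dom_merge_close segs max_gap → Pre_merge_close segs max_gap → Spec_merge_close segs max_gap (merge_close segs max_gap)

-- ===== LEMMAS AND PROOFS =====

theorem pyGetD_one_of_two_le {x : List Int} (h : 2 ≤ x.length) :
    PySem.List.pyGetD x 1 0 = x[1]'(by omega) := by
  rw [PySem.List.pyGetD_eq_getElem x 0 (by omega) (by omega)]
  norm_num

theorem pySetD_one_eq_set (x : List Int) (v : Int) :
    PySem.List.pySetD x 1 v = x.set 1 v := by
  rw [PySem.List.pySetD_of_nonneg x v (by omega)]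
  norm_num

-- writing x[1] back leaves x unchanged
theorem set_self_of_two_le {x : List Int} (h : 2 ≤ x.length) :
    PySem.List.pySetD x 1 (PySem.List.pyGetD x 1 0) = x := by
  rw [pyGetD_one_of_two_le h, pySetD_one_eq_set, List.set_getElem_self]

theorem pySetD_neg_one_concat {α : Type} (xs : List α) (x v : α) :
    PySem.List.pySetD (xs ++ [x]) (-1) v = xs ++ [v] := by
  rw [PySem.List.pySetD, PySem.List.pySet?, PySem.List.pyIdx?]
  simp

theorem pyGetD_pySetD_one {x : List Int} (v d : Int) (h : 2 ≤ x.length) :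
    PySem.List.pyGetD (PySem.List.pySetD x 1 v) 1 d = v := by
  have := PySem.List.pyGetD_pySetD_natCast x 1 1 v d (by omega)
  norm_num at this
  simpa using this

-- mcEmit on a nonempty run: copy of the run's head with index 1 overwritten by the last segment's [1]
theorem mcEmit_cons (h : List Int) (t : List (List Int)) :
    mcEmit (h :: t) =
      PySem.List.pySetD h 1 (PySem.List.pyGetD ((h :: t).getLastD []) 1 0) := by
  unfold mcEmit
  rw [PySem.List.pyGetD_zero_cons, PySem.List.pyGetD_neg_one (h :: t) [] (by simp)]
  rfl

theorem mcEmit_concat_last (h : List Int) (t : List (List Int)) (s : List Int) :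
    mcEmit ((h :: t) ++ [s]) = PySem.List.pySetD h 1 (PySem.List.pyGetD s 1 0) := by
  unfold mcEmit
  rw [PySem.List.pyGetD_neg_one_append_singleton]
  simp [PySem.List.pyGetD_zero_cons]

theorem mcEmit_singleton_of_two_le {s : List Int} (h : 2 ≤ s.length) : mcEmit [s] = s := by
  rw [mcEmit_cons]; simp [set_self_of_two_le h]

-- reading index 1 of an emitted run gives the run's last segment's [1]
theorem pyGetD_one_mcEmit (h : List Int) (t : List (List Int)) (hh : 2 ≤ h.length) :
    PySem.List.pyGetD (mcEmit (h :: t)) 1 0 =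
      PySem.List.pyGetD ((h :: t).getLastD []) 1 0 := by
  rw [mcEmit_cons]
  exact pyGetD_pySetD_one _ _ hh

theorem foldl_emit_eq_map (runs : List (List (List Int))) (init : List (List Int)) :
    runs.foldl (fun out run => out ++ [mcEmit run]) init = init ++ runs.map mcEmit := by
  induction runs generalizing init with
  | nil => simp
  | cons r rs ih => simp [List.foldl_cons, ih]

-- the central invariant: A's fold over the remaining segments, started from the emitted runs so far,
-- equals emitting B's phase-1 fold from the runs so far.
theorem mc_main (g : Int) (rest : List (List Int)) :
    ∀ (rs : List (List (List Int))) (h : List Int) (t : List (List Int)),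
      (∀ x ∈ rest, 2 ≤ x.length) →
      (∀ run ∈ rs ++ [h :: t], ∀ x ∈ run, 2 ≤ x.length) →
      rest.foldl (mcStepA g) ((rs ++ [h :: t]).map mcEmit) =
        (((((h :: t).getLastD []) :: rest).zip rest).foldl (mcStepB g) (rs ++ [h :: t])).map
          mcEmit := by
  induction rest with
  | nil => intro rs h t _ _; simp [List.zip]
  | cons s rest' ih =>
    intro rs h t hrest hruns
    have hh : 2 ≤ h.length := hruns (h :: t) (by simp) h (by simp)
    have hs : 2 ≤ s.length := hrest s (by simp)
    have hmapne : (rs ++ [h :: t]).map mcEmit = rs.map mcEmit ++ [mcEmit (h :: t)] := by simp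
    have hcondA :
        PySem.List.pyGetD (PySem.List.pyGetD ((rs ++ [h :: t]).map mcEmit) (-1) []) 1 0 =
          PySem.List.pyGetD ((h :: t).getLastD []) 1 0 := by
      rw [hmapne, PySem.List.pyGetD_neg_one_append_singleton, pyGetD_one_mcEmit _ _ hh]
    simp only [List.zip_cons_cons, List.foldl_cons]
    by_cases hc :
        PySem.List.pyGetD s 0 0 -
            PySem.List.pyGetD ((h :: t).getLastD []) 1 0 - 1 ≤ g
    · -- gap small: A overwrites out[-1][1]; B appends s to the last run
      have hstepA :
          mcStepA g ((rs ++ [h :: t]).map mcEmit) s = (rs ++ [(h :: t) ++ [s]]).map mcEmit := by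
        unfold mcStepA
        rw [hcondA, if_pos hc, hmapne, PySem.List.pyGetD_neg_one_append_singleton,
          pySetD_neg_one_concat]
        rw [mcEmit_cons, pySetD_one_eq_set, pySetD_one_eq_set, List.set_set]
        rw [List.map_append, List.map_cons]
        rw [mcEmit_concat_last, pySetD_one_eq_set]
        simp
      have hstepB : mcStepB g (rs ++ [h :: t]) ((h :: t).getLastD [], s) =
          rs ++ [(h :: t) ++ [s]] := by
        unfold mcStepB
        rw [if_pos hc, PySem.List.pyGetD_neg_one_append_singleton, pySetD_neg_one_concat]
      rw [hstepA, hstepB]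
      have hall : ∀ run ∈ rs ++ [h :: (t ++ [s])], ∀ x ∈ run, 2 ≤ x.length := by
        intro run hrun x hx
        rcases List.mem_append.1 hrun with h1 | h1
        · exact hruns run (by simp [h1]) x hx
        · simp only [List.mem_singleton] at h1; subst h1
          simp only [List.mem_cons, List.mem_append,
            List.not_mem_nil, or_false] at hx
          rcases hx with h2 | h2 | h2
          · subst h2; exact hh
          · exact hruns (h :: t) (by simp) x (by simp [h2])
          · subst h2; exact hs
      have := ih rs h (t ++ [s]) (fun x hx => hrest x (by simp [hx])) hall
      have hlasts : (h :: (t ++ [s])).getLastD [] = s := by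
        rw [List.getLastD_cons]; exact List.getLastD_concat
      rw [hlasts] at this
      exact this
    · -- gap large: both start a new run / append a copy of s
      have hstepA : mcStepA g ((rs ++ [h :: t]).map mcEmit) s =
          ((rs ++ [h :: t]) ++ [[s]]).map mcEmit := by
        unfold mcStepA
        rw [hcondA, if_neg hc]
        simp [mcEmit_singleton_of_two_le hs]
      have hstepB : mcStepB g (rs ++ [h :: t]) ((h :: t).getLastD [], s) =
          (rs ++ [h :: t]) ++ [[s]] := by
        unfold mcStepB
        rw [if_neg hc]
      rw [hstepA, hstepB]
      have hall : ∀ run ∈ (rs ++ [h :: t]) ++ [[s]], ∀ x ∈ run, 2 ≤ x.length := by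
        intro run hrun x hx
        rcases List.mem_append.1 hrun with h1 | h1
        · exact hruns run h1 x hx
        · simp only [List.mem_singleton] at h1; subst h1
          simp only [List.mem_singleton] at hx; subst hx; exact hs
      have := ih (rs ++ [h :: t]) s [] (fun x hx => hrest x (by simp [hx])) hall
      simpa using this

-- ===== VERDICT (by name: the statement is the Claim_ definition above) =====
theorem merge_close_spec : Claim_equal_merge_close := by
  intro segs max_gap _ hpre
  unfold Spec_merge_close
  match segs with
  | [] => rfl
  | s0 :: rest =>
    have hs0 : 2 ≤ s0.length := hpre s0 (by simp)
    have hrest : ∀ x ∈ rest, 2 ≤ x.length := fun x hx => hpre x (by simp [hx])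
    have halt : merge_close_alt (s0 :: rest) max_gap =
        (((s0 :: rest).zip rest).foldl (mcStepB max_gap) [[s0]]).foldl
          (fun out run => out ++ [mcEmit run]) [] := rfl
    show rest.foldl (mcStepA max_gap) [s0] = _
    rw [halt, foldl_emit_eq_map, List.nil_append]
    have hmain := mc_main max_gap rest [] s0 []
      hrest
      (by
        intro run hrun x hx
        simp only [List.nil_append, List.mem_singleton] at hrun; subst hrun
        simp only [List.mem_singleton] at hx; subst hx; exact hs0)
    simp only [List.nil_append] at hmain
    have hgl : (s0 :: ([] : List (List Int))).getLastD [] = s0 := rfl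
    rw [hgl] at hmain
    rw [← hmain]
    simp [mcEmit_singleton_of_two_le hs0]
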